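-- pv_equiv track=rewrite | github.com/coffeeisafruit/jv-matchmaker-platform | matching/enrichment/apollo_enrichment.py | map_employee_count
-- ===== SOURCE A (Python) =====
-- from typing import Dict, List, Optional, Tuple
--
-- EMPLOYEE_TO_BUSINESS_SIZE = [
--     (10, 'solopreneur'),
--     (50, 'small'),
--     (200, 'medium'),
--     (1000, 'established'),
--     (float('inf'), 'enterprise'),
-- ]
--
-- def map_employee_count(count) -> Optional[str]:
--     """Map Apollo employee count to business_size category."""
--     if count is None:
--         return None
--     try:
--         count = int(count)
--     except (ValueError, TypeError):
--         return None
--     for threshold, size in EMPLOYEE_TO_BUSINESS_SIZE: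
--         if count <= threshold:
--             return size
--     return None
-- ===== SOURCE B (Python) =====
-- _THRESHOLDS = [10, 50, 200, 1000]
-- _CATEGORIES = ['solopreneur', 'small', 'medium', 'established', 'enterprise']
--
-- def _bisect_left(xs, x):
--     lo, hi = 0, len(xs)
--     while lo < hi:
--         mid = (lo + hi) // 2
--         if xs[mid] < x:
--             lo = mid + 1
--         else:
--             hi = mid
--     return lo
--
-- def map_employee_count(count):
--     """Map Apollo employee count to business_size category."""
--     if count is None:
--         return None
--     try:
--         count = int(count)
--     except (ValueError, TypeError):
--         return None
--     return _CATEGORIES[_bisect_left(_THRESHOLDS, count)]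
-- ===== Notes on version B (the rewrite author's own statement) =====
-- stated objective: alternative
-- what changed: Replace the linear scan over (threshold, category) pairs (with a float('inf') sentinel) by a binary search (hand-written bisect_left) over a sorted thresholds list indexing a parallel categories list.
import Mathlib
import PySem

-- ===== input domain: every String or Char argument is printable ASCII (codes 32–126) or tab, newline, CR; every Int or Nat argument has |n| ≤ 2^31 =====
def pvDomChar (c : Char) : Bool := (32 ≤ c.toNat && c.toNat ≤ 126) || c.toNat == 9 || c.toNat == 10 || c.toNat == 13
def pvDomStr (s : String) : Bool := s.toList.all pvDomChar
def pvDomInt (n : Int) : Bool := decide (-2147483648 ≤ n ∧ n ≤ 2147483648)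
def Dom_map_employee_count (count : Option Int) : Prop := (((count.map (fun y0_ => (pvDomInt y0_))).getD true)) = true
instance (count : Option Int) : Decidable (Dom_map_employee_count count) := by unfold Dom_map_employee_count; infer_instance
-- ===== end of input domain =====

-- B replaces A's linear scan of the (threshold, category) table by a hand-written
-- binary search (bisect_left) over sorted thresholds indexing a parallel categories list.


-- ===== PORT A =====
-- The table: thresholds with `none` standing for float('inf') (count <= inf is always true).
def pvTableA : List (Option Int × String) :=
  [(some 10, "solopreneur"), (some 50, "small"), (some 200, "medium"),
   (some 1000, "established"), (none, "enterprise")]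

-- the for-loop over the table: return size at the first threshold with count <= threshold
def pvScanA (c : Int) : List (Option Int × String) → Option String
  | [] => none
  | (t, s) :: rest =>
    match t with
    | none => some s                      -- count <= inf : always true
    | some th => if c ≤ th then some s else pvScanA c rest

-- count is None → None; int(count) on an Int never raises, so the except branch is dead
def map_employee_count (count : Option Int) : Option String :=
  match count with
  | none => none
  | some c => pvScanA c pvTableA

-- ===== PORT B =====
def pvThresholds : List Int := [10, 50, 200, 1000]
def pvCategories : List String := ["solopreneur", "small", "medium", "established", "enterprise"]

-- hand-written bisect_left while-loop; fuel bounds the iterations (hi-lo halves each step)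
def pvBisectLoop (xs : List Int) (x : Int) (lo hi : Nat) : Nat → Nat
  | 0 => lo
  | fuel + 1 =>
    if lo < hi then
      let mid := (lo + hi) / 2
      if xs.getD mid 0 < x then pvBisectLoop xs x (mid + 1) hi fuel
      else pvBisectLoop xs x lo mid fuel
    else lo

def pvBisectLeft (xs : List Int) (x : Int) : Nat :=
  pvBisectLoop xs x 0 xs.length (xs.length + 1)

-- index is always ≤ 4 < 5, so Python's CATEGORIES[idx] never raises; getD is exact here
def map_employee_count_alt (count : Option Int) : Option String :=
  match count with
  | none => none
  | some c => some (pvCategories.getD (pvBisectLeft pvThresholds c) "")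

-- ===== PRECONDITION & SPEC =====
def Spec_map_employee_count (count : Option Int) (out : Option String) : Prop := out = map_employee_count_alt count
instance (count : Option Int) (out : Option String) : Decidable (Spec_map_employee_count count out) := by unfold Spec_map_employee_count; infer_instance

-- ===== CLAIM (what is proved, stated in full; the proofs are below) =====
def Claim_equal_map_employee_count : Prop := ∀ (count : Option Int), Dom_map_employee_count count → Spec_map_employee_count count (map_employee_count count)

-- ===== LEMMAS AND PROOFS =====

-- ===== VERDICT (by name: the statement is the Claim_ definition above) =====
theorem map_employee_count_spec : Claim_equal_map_employee_count := by
  intro count _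
  unfold Spec_map_employee_count map_employee_count map_employee_count_alt
  cases count with
  | none => rfl
  | some c =>
    by_cases h1 : c ≤ 10 <;> by_cases h2 : c ≤ 50 <;> by_cases h3 : c ≤ 200 <;>
      by_cases h4 : c ≤ 1000 <;>
      simp_all [pvScanA, pvTableA, pvBisectLeft, pvBisectLoop, pvThresholds, pvCategories] <;>
      first
        | omega
        | (split_ifs <;> first | (simp_all; done) | omega)
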